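-- pv_equiv track=rewrite | github.com/rinaAr/Algs | 2-4/8/8.py | get_hashes
-- ===== SOURCE A (Python) =====
-- def get_hashes(s, k, base=31, mod=10 ** 9 + 7):
--     """Вычисление хешей всех подстрок длиной k для строки s."""
--     n = len(s)
--     hashes = {}
--     hash_value = 0
--     base_k = pow(base, k, mod)  # base^k % mod
--
--     # Вычисляем хеш для первой подстроки длиной k
--     for i in range(k):
--         hash_value = (hash_value * base + ord(s[i])) % mod
--
--     hashes[hash_value] = [0]  # добавляем индекс начала подстроки
--
--     # Прокручиваем окно по строке и вычисляем хеши для подстрок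
--     for i in range(1, n - k + 1):
--         hash_value = (hash_value * base + ord(s[i + k - 1]) - ord(s[i - 1]) * base_k) % mod
--         if hash_value not in hashes:
--             hashes[hash_value] = []
--         hashes[hash_value].append(i)
--
--     return hashes
-- ===== SOURCE B (Python) =====
-- def get_hashes(s, k, base=31, mod=10 ** 9 + 7):
--     """Prefix-hash table + O(1) window differences instead of an incremental rolling window."""
--     n = len(s)
--     if not 0 <= k <= n:
--         raise IndexError("substring length out of range")
--     prefix = [0]
--     h = 0
--     for ch in s:
--         h = (h * base + ord(ch)) % mod
--         prefix.append(h)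
--     base_k = pow(base, k, mod)
--     hashes = {}
--     for i in range(n - k + 1):
--         hv = (prefix[i + k] - prefix[i] * base_k) % mod
--         if hv not in hashes:
--             hashes[hv] = []
--         hashes[hv].append(i)
--     return hashes
-- ===== Notes on version B (the rewrite author's own statement) =====
-- stated objective: alternative
-- what changed: Replaces A's incremental rolling-window hash (each window hash derived from the previous one) with a prefix-hash table built in one pass plus an O(1) modular difference P[i+k]-P[i]*base^k per window.
import Mathlib
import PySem

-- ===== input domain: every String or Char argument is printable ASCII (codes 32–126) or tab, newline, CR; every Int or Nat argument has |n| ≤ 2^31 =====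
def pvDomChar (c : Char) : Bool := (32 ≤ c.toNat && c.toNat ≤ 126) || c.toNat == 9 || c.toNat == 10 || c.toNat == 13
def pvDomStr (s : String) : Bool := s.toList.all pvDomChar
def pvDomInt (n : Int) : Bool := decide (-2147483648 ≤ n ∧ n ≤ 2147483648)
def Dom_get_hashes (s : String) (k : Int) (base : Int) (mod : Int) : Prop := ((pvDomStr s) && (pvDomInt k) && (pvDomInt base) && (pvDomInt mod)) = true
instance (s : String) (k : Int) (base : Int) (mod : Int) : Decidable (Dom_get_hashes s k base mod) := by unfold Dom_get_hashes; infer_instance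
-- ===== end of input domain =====

-- B replaces A's incremental rolling window with a prefix-hash table and per-window O(1)
-- differences (objective: alternative decomposition, same asymptotic cost).

-- ord(s[j]) for every position, shared primitive of both ports
def pyOrds (s : String) : List Int := s.toList.map (fun c => (c.toNat : Int))

-- ===== PORT A =====
def get_hashes (s : String) (k : Int) (base : Int) (mod : Int) : List (Int × List Int) :=
  let cs := pyOrds s
  let n : Int := (cs.length : Int)
  -- pow(base, k, mod): exact for 0 ≤ k (Pre_ excludes negative k, where Python needs a modular inverse)
  let base_k : Int := PySem.Int.powMod base k.toNat mod
  let hash0 : Int := (PySem.List.pyRange 0 k 1).foldl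
      (fun hv i => PySem.Int.mod (hv * base + PySem.List.pyGetD cs i 0) mod) 0
  let hashes0 : PySem.Dict Int (List Int) := PySem.Dict.empty.insert hash0 [0]
  let st := (PySem.List.pyRange 1 (n - k + 1) 1).foldl
      (fun (st : Int × PySem.Dict Int (List Int)) i =>
        let hv := PySem.Int.mod (st.1 * base + PySem.List.pyGetD cs (i + k - 1) 0
                    - PySem.List.pyGetD cs (i - 1) 0 * base_k) mod
        let d := if st.2.contains hv then st.2 else st.2.insert hv []
        (hv, d.modify hv [] (fun l => l ++ [i])))
      (hash0, hashes0)
  st.2.items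

-- ===== PORT B =====
def get_hashes_alt (s : String) (k : Int) (base : Int) (mod : Int) : List (Int × List Int) :=
  let cs := pyOrds s
  -- 'if not 0 <= k <= n: raise IndexError' — outside Pre_; the port returns [] where B raises
  if k < 0 ∨ (cs.length : Int) < k then [] else
  let pr := cs.foldl
      (fun (st : Int × List Int) c =>
        let h := PySem.Int.mod (st.1 * base + c) mod
        (h, st.2 ++ [h]))
      (0, [0])
  let prefixes := pr.2
  -- pow(base, k, mod): exact for 0 ≤ k, as in port A
  let base_k : Int := PySem.Int.powMod base k.toNat mod
  let d := (PySem.List.pyRange 0 ((cs.length : Int) - k + 1) 1).foldl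
      (fun (d : PySem.Dict Int (List Int)) i =>
        let hv := PySem.Int.mod (PySem.List.pyGetD prefixes (i + k) 0
                    - PySem.List.pyGetD prefixes i 0 * base_k) mod
        let d' := if d.contains hv then d else d.insert hv []
        d'.modify hv [] (fun l => l ++ [i]))
      PySem.Dict.empty
  d.items

-- ===== PRECONDITION & SPEC =====
-- Pre_ keeps the natural domain of "hashes of all length-k substrings": on every excluded
-- input A raises (IndexError for k < 0 or k > len(s), ValueError for mod = 0) and returns nothing.
def Pre_get_hashes (s : String) (k : Int) (base : Int) (mod : Int) : Prop :=
  0 ≤ k ∧ k ≤ PySem.Str.len s ∧ mod ≠ 0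
instance (s : String) (k : Int) (base : Int) (mod : Int) : Decidable (Pre_get_hashes s k base mod) := by unfold Pre_get_hashes; infer_instance

def pvWitness_get_hashes : String × Int × Int × Int := ("ab", 1, 31, 7)

def Spec_get_hashes (s : String) (k : Int) (base : Int) (mod : Int) (out : List (Int × List Int)) : Prop := out = get_hashes_alt s k base mod
instance (s : String) (k : Int) (base : Int) (mod : Int) (out : List (Int × List Int)) : Decidable (Spec_get_hashes s k base mod out) := by unfold Spec_get_hashes; infer_instance

-- ===== CLAIM (what is proved, stated in full; the proofs are below) =====
def Claim_equal_get_hashes : Prop := ∀ (s : String) (k : Int) (base : Int) (mod : Int), Dom_get_hashes s k base mod → Pre_get_hashes s k base mod → Spec_get_hashes s k base mod (get_hashes s k base mod)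

-- ===== LEMMAS AND PROOFS =====

-- the (un-reduced) polynomial hash of a list of character codes
def polyH (base : Int) (cs : List Int) : Int := cs.foldl (fun h c => h * base + c) 0

-- the canonical hash of the window of length K starting at i
def winH (base mod : Int) (cs : List Int) (K : Nat) (i : Int) : Int :=
  PySem.Int.mod (polyH base (cs.take (i.toNat + K)) - polyH base (cs.take i.toNat) * base ^ K) mod

-- the common per-window dict update both programs perform
def dstep (base mod : Int) (cs : List Int) (K : Nat)
    (d : PySem.Dict Int (List Int)) (i : Int) : PySem.Dict Int (List Int) :=
  let hv := winH base mod cs K i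
  let d' := if d.contains hv then d else d.insert hv []
  d'.modify hv [] (fun l => l ++ [i])

lemma fmod_congr (a b m : Int) (h : m ∣ (a - b)) : PySem.Int.mod a m = PySem.Int.mod b m := by
  obtain ⟨t, ht⟩ := h
  have hab : a = b + m * t := by linarith
  show Int.fmod a m = Int.fmod b m
  rw [hab, Int.add_mul_fmod_self_left]

lemma fmod_sub_dvd (a m : Int) : m ∣ (PySem.Int.mod a m - a) := by
  refine ⟨-(a.fdiv m), ?_⟩
  have := Int.mul_fdiv_add_fmod a m
  show Int.fmod a m - a = m * -(a.fdiv m)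
  linarith

lemma polyH_append (base : Int) (cs : List Int) (c : Int) :
    polyH base (cs ++ [c]) = polyH base cs * base + c := by
  simp [polyH, List.foldl_append]

lemma polyH_take_succ (base : Int) (cs : List Int) (j : Nat) (h : j < cs.length) :
    polyH base (cs.take (j + 1)) = polyH base (cs.take j) * base + cs.getD j 0 := by
  have h1 : cs.take (j + 1) = cs.take j ++ [cs[j]] := by
    rw [List.take_add_one, List.getElem?_eq_getElem h]; rfl
  rw [h1, polyH_append, List.getD_eq_getElem cs 0 h]

-- A's initial loop computes the canonical hash of the first window
lemma initA (base mod : Int) (cs : List Int) (K : Nat) (hK : K ≤ cs.length) :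
    (PySem.List.pyRange 0 (K : Int) 1).foldl
      (fun hv i => PySem.Int.mod (hv * base + PySem.List.pyGetD cs i 0) mod) 0
    = PySem.Int.mod (polyH base (cs.take K)) mod := by
  induction K with
  | zero =>
      rw [show ((0 : Nat) : Int) = 0 from rfl, PySem.List.pyRange_one_eq_nil (le_refl 0)]
      simp [polyH]
      show (0 : Int) = Int.fmod 0 mod
      simp
  | succ j ih =>
      have hj : j ≤ cs.length := by omega
      have hlt : j < cs.length := by omega
      have hsplit : PySem.List.pyRange 0 ((j : Int) + 1) 1
          = PySem.List.pyRange 0 (j : Int) 1 ++ [(j : Int)] := by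
        simpa using PySem.List.pyRange_one_succ_right (a := 0) (b := (j : Int)) (by omega)
      rw [show ((j + 1 : Nat) : Int) = (j : Int) + 1 by push_cast; ring, hsplit,
        List.foldl_append, ih hj]
      simp only [List.foldl_cons, List.foldl_nil, PySem.List.pyGetD_natCast]
      rw [polyH_take_succ base cs j hlt]
      apply fmod_congr
      have := fmod_sub_dvd (polyH base (cs.take j)) mod
      have h2 : mod ∣ (PySem.Int.mod (polyH base (cs.take j)) mod - polyH base (cs.take j)) * base :=
        Dvd.dvd.mul_right this base
      have h3 : (PySem.Int.mod (polyH base (cs.take j)) mod * base + cs.getD j 0)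
          - (polyH base (cs.take j) * base + cs.getD j 0)
          = (PySem.Int.mod (polyH base (cs.take j)) mod - polyH base (cs.take j)) * base := by ring
      rw [h3]; exact h2

-- B's prefix loop computes the table of canonical prefix hashes
lemma prefB (base mod : Int) (cs : List Int) :
    cs.foldl
      (fun (st : Int × List Int) c =>
        let h := PySem.Int.mod (st.1 * base + c) mod
        (h, st.2 ++ [h]))
      (0, [0])
    = (PySem.Int.mod (polyH base cs) mod,
       (List.range (cs.length + 1)).map (fun j => PySem.Int.mod (polyH base (cs.take j)) mod)) := by
  induction cs using List.reverseRecOn with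
  | nil =>
      have h0 : PySem.Int.mod 0 mod = 0 := by show Int.fmod 0 mod = 0; simp
      simp [polyH, h0]
  | append_singleton cs c ih =>
      rw [List.foldl_append, ih]
      simp only [List.foldl_cons, List.foldl_nil]
      have hfst : PySem.Int.mod (PySem.Int.mod (polyH base cs) mod * base + c) mod
          = PySem.Int.mod (polyH base (cs ++ [c])) mod := by
        rw [polyH_append]
        apply fmod_congr
        have h1 := fmod_sub_dvd (polyH base cs) mod
        have h3 : (PySem.Int.mod (polyH base cs) mod * base + c) - (polyH base cs * base + c)
            = (PySem.Int.mod (polyH base cs) mod - polyH base cs) * base := by ring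
        rw [h3]; exact Dvd.dvd.mul_right h1 base
      simp only [Prod.mk.injEq]
      refine ⟨hfst, ?_⟩
      have hlen : (cs ++ [c]).length = cs.length + 1 := by simp
      rw [hlen]
      conv_rhs => rw [List.range_succ, List.map_append]
      congr 1
      · apply List.map_congr_left
        intro j hj
        rw [List.mem_range] at hj
        rw [List.take_append_of_le_length (by omega)]
      · simp only [List.map_cons, List.map_nil]
        rw [List.take_of_length_le (by simp), hfst]

-- the rolling-hash step lands on the next canonical window hash
lemma roll_hash (base mod : Int) (cs : List Int) (K j : Nat) (h : j + K < cs.length) :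
    PySem.Int.mod
      (PySem.Int.mod (polyH base (cs.take (j + K)) - polyH base (cs.take j) * base ^ K) mod * base
        + cs.getD (j + K) 0 - cs.getD j 0 * PySem.Int.mod (base ^ K) mod) mod
    = PySem.Int.mod (polyH base (cs.take (j + K + 1)) - polyH base (cs.take (j + 1)) * base ^ K) mod := by
  have hjK : j + K < cs.length := h
  have hj : j < cs.length := by omega
  rw [polyH_take_succ base cs (j + K) hjK, polyH_take_succ base cs j hj]
  apply fmod_congr
  have h1 := fmod_sub_dvd (polyH base (cs.take (j + K)) - polyH base (cs.take j) * base ^ K) mod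
  have h2 := fmod_sub_dvd (base ^ K) mod
  have h3 :
      (PySem.Int.mod (polyH base (cs.take (j + K)) - polyH base (cs.take j) * base ^ K) mod * base
        + cs.getD (j + K) 0 - cs.getD j 0 * PySem.Int.mod (base ^ K) mod)
      - (polyH base (cs.take (j + K)) * base + cs.getD (j + K) 0
        - (polyH base (cs.take j) * base + cs.getD j 0) * base ^ K)
      = (PySem.Int.mod (polyH base (cs.take (j + K)) - polyH base (cs.take j) * base ^ K) mod
          - (polyH base (cs.take (j + K)) - polyH base (cs.take j) * base ^ K)) * base
        - cs.getD j 0 * (PySem.Int.mod (base ^ K) mod - base ^ K) := by ring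
  rw [h3]
  exact dvd_sub (Dvd.dvd.mul_right h1 base) (Dvd.dvd.mul_left h2 (cs.getD j 0))

-- A's main loop: the running hash stays canonical and the dict evolves by dstep
lemma rollA (base mod : Int) (cs : List Int) (k : Int) (hk : 0 ≤ k) (j : Nat)
    (hm : j + k.toNat ≤ cs.length) (D0 : PySem.Dict Int (List Int)) :
    (PySem.List.pyRange 1 (1 + (j : Int)) 1).foldl
      (fun (st : Int × PySem.Dict Int (List Int)) i =>
        let hv := PySem.Int.mod (st.1 * base + PySem.List.pyGetD cs (i + k - 1) 0
                    - PySem.List.pyGetD cs (i - 1) 0 * PySem.Int.powMod base k.toNat mod) mod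
        let d := if st.2.contains hv then st.2 else st.2.insert hv []
        (hv, d.modify hv [] (fun l => l ++ [i])))
      (winH base mod cs k.toNat 0, D0)
    = (winH base mod cs k.toNat (j : Int),
       (PySem.List.pyRange 1 (1 + (j : Int)) 1).foldl (dstep base mod cs k.toNat) D0) := by
  induction j generalizing D0 with
  | zero =>
      rw [show (1 : Int) + ((0 : Nat) : Int) = 1 by norm_num, PySem.List.pyRange_one_eq_nil (le_refl 1)]
      rfl
  | succ j ih =>
      have hm' : j + k.toNat ≤ cs.length := by omega
      have hsplit : PySem.List.pyRange 1 (1 + ((j + 1 : Nat) : Int)) 1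
          = PySem.List.pyRange 1 (1 + (j : Int)) 1 ++ [1 + (j : Int)] := by
        rw [show (1 : Int) + ((j + 1 : Nat) : Int) = (1 + (j : Int)) + 1 by push_cast; ring]
        exact PySem.List.pyRange_one_succ_right (by omega)
      rw [hsplit, List.foldl_append, List.foldl_append, ih hm']
      simp only [List.foldl_cons, List.foldl_nil]
      have hi1 : (1 + (j : Int)) + k - 1 = ((j + k.toNat : Nat) : Int) := by
        have := Int.toNat_of_nonneg hk
        push_cast
        omega
      have hi2 : (1 + (j : Int)) - 1 = ((j : Nat) : Int) := by ring
      have hwj : winH base mod cs k.toNat (j : Int)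
          = PySem.Int.mod (polyH base (cs.take (j + k.toNat))
              - polyH base (cs.take j) * base ^ k.toNat) mod := by
        simp [winH]
      have hkey : PySem.Int.mod (winH base mod cs k.toNat (j : Int) * base
            + PySem.List.pyGetD cs ((1 + (j : Int)) + k - 1) 0
            - PySem.List.pyGetD cs ((1 + (j : Int)) - 1) 0 * PySem.Int.powMod base k.toNat mod) mod
          = winH base mod cs k.toNat (1 + (j : Int)) := by
        rw [hi1, hi2, PySem.List.pyGetD_natCast, PySem.List.pyGetD_natCast,
          PySem.Int.powMod_eq, hwj]
        have hroll := roll_hash base mod cs k.toNat j (by omega)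
        rw [hroll]
        have ht : (1 + (j : Int)).toNat = j + 1 := by omega
        simp only [winH, ht]
        rw [show j + 1 + k.toNat = j + k.toNat + 1 by ring]
      rw [show ((j + 1 : Nat) : Int) = 1 + (j : Int) by push_cast; ring]
      rw [hkey]
      simp only [dstep]

-- the first dict write of both programs is the same dict
lemma dstep_first (base mod : Int) (cs : List Int) (K : Nat) :
    dstep base mod cs K PySem.Dict.empty 0
    = PySem.Dict.empty.insert (winH base mod cs K 0) [0] := by
  simp [dstep, PySem.Dict.modify, PySem.Dict.getD_insert_self, PySem.Dict.insert_insert_self,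
    PySem.Dict.contains_empty]

lemma winH_zero (base mod : Int) (cs : List Int) (K : Nat) :
    winH base mod cs K 0 = PySem.Int.mod (polyH base (cs.take K)) mod := by
  simp [winH, polyH]

-- B's window formula computes the canonical window hash
lemma winB (base mod : Int) (cs : List Int) (k : Int) (hk : 0 ≤ k) (hK : k.toNat ≤ cs.length)
    (i : Int) (h0 : 0 ≤ i) (h1 : i < (cs.length : Int) - k + 1) :
    PySem.Int.mod
      (PySem.List.pyGetD
          ((List.range (cs.length + 1)).map (fun j => PySem.Int.mod (polyH base (cs.take j)) mod)) (i + k) 0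
        - PySem.List.pyGetD
          ((List.range (cs.length + 1)).map (fun j => PySem.Int.mod (polyH base (cs.take j)) mod)) i 0
          * PySem.Int.powMod base k.toNat mod) mod
    = winH base mod cs k.toNat i := by
  have hik : i + k = ((i.toNat + k.toNat : Nat) : Int) := by omega
  have e1 : PySem.List.pyGetD
      ((List.range (cs.length + 1)).map (fun j => PySem.Int.mod (polyH base (cs.take j)) mod)) (i + k) 0
      = PySem.Int.mod (polyH base (cs.take (i.toNat + k.toNat))) mod := by
    rw [hik, PySem.List.pyGetD_natCast, PySem.List.getD_map_range _ _ _ _ (by omega)]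
  have e2 : PySem.List.pyGetD
      ((List.range (cs.length + 1)).map (fun j => PySem.Int.mod (polyH base (cs.take j)) mod)) i 0
      = PySem.Int.mod (polyH base (cs.take i.toNat)) mod := by
    rw [show i = ((i.toNat : Nat) : Int) by omega, PySem.List.pyGetD_natCast,
      PySem.List.getD_map_range _ _ _ _ (by omega), Int.toNat_natCast]
  rw [e1, e2, PySem.Int.powMod_eq]
  simp only [winH]
  apply fmod_congr
  have a1 := fmod_sub_dvd (polyH base (cs.take (i.toNat + k.toNat))) mod
  have a2 := fmod_sub_dvd (polyH base (cs.take i.toNat)) mod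
  have a3 := fmod_sub_dvd (base ^ k.toNat) mod
  have h3 :
      (PySem.Int.mod (polyH base (cs.take (i.toNat + k.toNat))) mod
        - PySem.Int.mod (polyH base (cs.take i.toNat)) mod * PySem.Int.mod (base ^ k.toNat) mod)
      - (polyH base (cs.take (i.toNat + k.toNat)) - polyH base (cs.take i.toNat) * base ^ k.toNat)
      = (PySem.Int.mod (polyH base (cs.take (i.toNat + k.toNat))) mod
          - polyH base (cs.take (i.toNat + k.toNat)))
        - (PySem.Int.mod (polyH base (cs.take i.toNat)) mod
            * (PySem.Int.mod (base ^ k.toNat) mod - base ^ k.toNat)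
          + (PySem.Int.mod (polyH base (cs.take i.toNat)) mod - polyH base (cs.take i.toNat))
            * base ^ k.toNat) := by ring
  rw [h3]
  exact dvd_sub a1 (dvd_add (Dvd.dvd.mul_left a3 _) (Dvd.dvd.mul_right a2 _))

-- B's dict loop, with the window formula replaced by the canonical window hash
lemma stepB_eq (base mod : Int) (cs : List Int) (k : Int) (hk : 0 ≤ k) (hK : k.toNat ≤ cs.length) :
    (PySem.List.pyRange 0 ((cs.length : Int) - k + 1) 1).foldl
      (fun (d : PySem.Dict Int (List Int)) i =>
        let hv := PySem.Int.mod (PySem.List.pyGetD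
            ((List.range (cs.length + 1)).map (fun j => PySem.Int.mod (polyH base (cs.take j)) mod)) (i + k) 0
          - PySem.List.pyGetD
            ((List.range (cs.length + 1)).map (fun j => PySem.Int.mod (polyH base (cs.take j)) mod)) i 0
            * PySem.Int.powMod base k.toNat mod) mod
        let d' := if d.contains hv then d else d.insert hv []
        d'.modify hv [] (fun l => l ++ [i]))
      PySem.Dict.empty
    = (PySem.List.pyRange 0 ((cs.length : Int) - k + 1) 1).foldl
        (dstep base mod cs k.toNat) PySem.Dict.empty := by
  apply PySem.List.foldl_congr_mem
  intro acc i hi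
  rw [PySem.List.mem_pyRange_one] at hi
  simp only [dstep]
  rw [winB base mod cs k hk hK i hi.1 (by omega)]

-- ===== VERDICT (by name: the statement is the Claim_ definition above) =====
theorem get_hashes_spec : Claim_equal_get_hashes := by
  intro s k base mod _ hpre
  obtain ⟨hk0, hkn, _⟩ := hpre
  unfold Spec_get_hashes
  rw [PySem.Str.len_eq] at hkn
  have hlen : (pyOrds s).length = s.toList.length := by simp [pyOrds]
  simp only [get_hashes, get_hashes_alt]
  rw [if_neg (by push_neg; constructor <;> omega)]
  set cs := pyOrds s with hcs
  have hKn : k.toNat ≤ cs.length := by omega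
  have hkK : k = ((k.toNat : Nat) : Int) := (Int.toNat_of_nonneg hk0).symm
  -- B's prefix table
  rw [prefB base mod cs]
  -- A's first-window hash
  have hinit : (PySem.List.pyRange 0 k 1).foldl
      (fun hv i => PySem.Int.mod (hv * base + PySem.List.pyGetD cs i 0) mod) 0
      = winH base mod cs k.toNat 0 := by
    rw [hkK, initA base mod cs k.toNat hKn, winH_zero, Int.toNat_natCast]
  rw [hinit]
  -- B's loop is the dstep loop
  rw [stepB_eq base mod cs k hk0 hKn]
  -- align the two loop ranges and peel off B's first iteration
  rw [show (cs.length : Int) - k + 1 = 1 + ((cs.length - k.toNat : Nat) : Int) by omega]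
  rw [PySem.List.pyRange_one_cons (by omega : (0 : Int) < 1 + ((cs.length - k.toNat : Nat) : Int))]
  rw [List.foldl_cons, show (0 : Int) + 1 = 1 from rfl, dstep_first]
  -- A's main loop
  rw [rollA base mod cs k hk0 (cs.length - k.toNat) (by omega)]
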